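-- pv_equiv track=rewrite | github.com/Skir131/programmers | Level 2/방금 그 곡.py | convert_song
-- ===== SOURCE A (Python) =====
-- def convert_song(songs):
--     # 문자열을 스플릿 또는 인덱싱 하는 과정에서 "#"가 포함되어 있는 코드는 불편하므로,
--     # "#"가 포함되어 있는 코드를 소문자로 변경한다.
--     while True:
--         if songs.find("C#") == -1:
--             break
--         else:
--             songs = songs.replace("C#", "c")
--     while True:
--         if songs.find("D#") == -1:
--             break
--         else:
--             songs = songs.replace("D#", "d")
--     while True:
--         if songs.find("E#") == -1:
--             break
--         else:
--             songs = songs.replace("E#", "e")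
--     while True:
--         if songs.find("F#") == -1:
--             break
--         else:
--             songs = songs.replace("F#", "f")
--     while True:
--         if songs.find("G#") == -1:
--             break
--         else:
--             songs = songs.replace("G#", "g")
--     while True:
--         if songs.find("A#") == -1:
--             break
--         else:
--             songs = songs.replace("A#", "a")
--
--     return songs
-- ===== SOURCE B (Python) =====
-- def convert_song(songs):
--     out = []
--     i = 0
--     n = len(songs)
--     while i < n:
--         ch = songs[i]
--         if ch in 'CDEFGA' and i + 1 < n and songs[i + 1] == '#':
--             out.append(ch.lower())
--             i += 2
--         else:
--             out.append(ch)
--             i += 1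
--     return ''.join(out)
-- ===== Notes on version B (the rewrite author's own statement) =====
-- stated objective: alternative
-- what changed: Replaces the six repeated find/replace whole-string passes by a single left-to-right scan that lowercases a note letter followed by a sharp sign and skips two positions, joining the pieces once.
import Mathlib
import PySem

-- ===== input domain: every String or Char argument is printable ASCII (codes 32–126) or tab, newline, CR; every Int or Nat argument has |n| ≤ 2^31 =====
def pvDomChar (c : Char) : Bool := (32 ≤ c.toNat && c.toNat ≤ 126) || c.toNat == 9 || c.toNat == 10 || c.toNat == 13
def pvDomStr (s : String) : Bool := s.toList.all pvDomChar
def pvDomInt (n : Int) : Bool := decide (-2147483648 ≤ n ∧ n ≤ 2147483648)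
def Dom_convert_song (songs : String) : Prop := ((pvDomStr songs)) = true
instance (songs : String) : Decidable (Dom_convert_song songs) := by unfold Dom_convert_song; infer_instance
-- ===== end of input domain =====

-- B replaces A's six repeated find/replace whole-string passes by one left-to-right scan (alternative decomposition); same return value, proved equal on all strings.

-- ===== PORT A =====
-- one 'while True: if songs.find(pat) == -1: break else: songs = songs.replace(pat, rep)' loop;
-- the fuel only makes the loop total: str.replace removes every occurrence, so the Python loop
-- runs at most two iterations (proved below) and the fuel is never exhausted.
def loopA (pat rep : String) : Nat → String → String
  | 0, s => s
  | n + 1, s => if PySem.Str.find s pat = -1 then s else loopA pat rep n (PySem.Str.replace s pat rep)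

def convert_song (songs : String) : String :=
  let fuel := songs.toList.length + 2
  let s1 := loopA "C#" "c" fuel songs
  let s2 := loopA "D#" "d" fuel s1
  let s3 := loopA "E#" "e" fuel s2
  let s4 := loopA "F#" "f" fuel s3
  let s5 := loopA "G#" "g" fuel s4
  let s6 := loopA "A#" "a" fuel s5
  s6

-- ===== PORT B =====
-- the single scan of Source B: note letter followed by '#' → lowercase letter, advance 2; else copy, advance 1
def goB : List Char → List Char
  | [] => []
  | [c] => [c]
  | c :: d :: t =>
    if ['C', 'D', 'E', 'F', 'G', 'A'].contains c && d == '#' then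
      PySem.Chars.lowerChar c :: goB t
    else
      c :: goB (d :: t)

def convert_song_alt (songs : String) : String :=
  String.ofList (goB songs.toList)

-- ===== PRECONDITION & SPEC =====
def Spec_convert_song (songs : String) (out : String) : Prop := out = convert_song_alt songs
instance (songs : String) (out : String) : Decidable (Spec_convert_song songs out) := by unfold Spec_convert_song; infer_instance

-- ===== CLAIM (what is proved, stated in full; the proofs are below) =====
def Claim_equal_convert_song : Prop := ∀ (songs : String), Dom_convert_song songs → Spec_convert_song songs (convert_song songs)

-- ===== LEMMAS AND PROOFS =====

-- proof-side helper: one replacement pass for the two-char pattern [u,'#'] → [l]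
def scanOne (u l : Char) : List Char → List Char
  | [] => []
  | [c] => [c]
  | c :: d :: t =>
    if c = u ∧ d = '#' then l :: scanOne u l t else c :: scanOne u l (d :: t)

-- proof-side helper: simultaneous replacement for an association list of (letter, lowercase)
def scanMulti (P : List (Char × Char)) : List Char → List Char
  | [] => []
  | [c] => [c]
  | c :: d :: t =>
    if d = '#' then
      match P.lookup c with
      | some v => v :: scanMulti P t
      | none => c :: scanMulti P (d :: t)
    else c :: scanMulti P (d :: t)

theorem lookup_mem {P : List (Char × Char)} {c v : Char} (h : P.lookup c = some v) :
    (c, v) ∈ P := by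
  induction P with
  | nil => simp [List.lookup] at h
  | cons p ps ih =>
    rw [List.lookup] at h
    cases hc : c == p.1 with
    | true =>
      rw [hc] at h
      have hcp : c = p.1 := by simpa using hc
      have hv : p.2 = v := Option.some.inj h
      rw [hcp, ← hv]
      exact List.mem_cons.mpr (Or.inl Prod.mk.eta.symm)
    | false =>
      rw [hc] at h
      exact List.mem_cons_of_mem _ (ih h)

-- L1: PySem's replace with pattern [u,'#'] and replacement [l] is exactly scanOne
theorem replace_go_eq_scanOne (u l : Char) :
    ∀ (fuel : Nat) (s acc : List Char), s.length ≤ fuel →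
      PySem.Chars.replace.go [u, '#'] [l] fuel s acc = acc.reverse ++ scanOne u l s := by
  intro fuel
  induction fuel with
  | zero =>
    intro s acc h
    have : s = [] := List.eq_nil_of_length_eq_zero (Nat.le_zero.mp h)
    subst this
    simp [PySem.Chars.replace.go, scanOne]
  | succ n ih =>
    intro s acc h
    match s with
    | [] => simp [PySem.Chars.replace.go, scanOne]
    | [c] =>
      rw [PySem.Chars.replace.go]
      have hpre : List.isPrefixOf [u, '#'] [c] = false := by
        simp [List.isPrefixOf]
      rw [hpre]
      simp only [Bool.false_eq_true, if_false]
      cases n <;> simp [PySem.Chars.replace.go, scanOne]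
    | c :: d :: t =>
      simp only [List.length_cons] at h
      by_cases hm : c = u ∧ d = '#'
      · obtain ⟨hc, hd⟩ := hm
        subst hc; subst hd
        rw [PySem.Chars.replace.go]
        have hpre : List.isPrefixOf [c, '#'] (c :: '#' :: t) = true := by
          simp [List.isPrefixOf]
        rw [hpre]
        simp only [if_true]
        have hdrop : List.drop [c, '#'].length (c :: '#' :: t) = t := rfl
        rw [hdrop, ih t ([l].reverse ++ acc) (by omega)]
        rw [scanOne, if_pos ⟨rfl, rfl⟩]
        simp
      · rw [PySem.Chars.replace.go]
        have hpre : List.isPrefixOf [u, '#'] (c :: d :: t) = false := by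
          rw [Bool.eq_false_iff]
          intro hb
          have hp := List.isPrefixOf_iff_prefix.mp hb
          obtain ⟨h1, h2⟩ := List.cons_prefix_cons.mp hp
          obtain ⟨h3, _⟩ := List.cons_prefix_cons.mp h2
          exact hm ⟨h1.symm, h3.symm⟩
        rw [hpre]
        simp only [Bool.false_eq_true, if_false]
        rw [ih (d :: t) (c :: acc) (by simp; omega)]
        rw [scanOne, if_neg hm]
        simp

theorem replace_eq_scanOne (u l : Char) (s : List Char) :
    PySem.Chars.replace s [u, '#'] [l] = scanOne u l s := by
  rw [PySem.Chars.replace]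
  simp only [List.isEmpty_cons, Bool.false_eq_true, if_false]
  exact replace_go_eq_scanOne u l s.length s [] (le_refl _)

-- L2: no occurrence → scanOne is the identity
theorem scanOne_id_of_not_infix (u l : Char) :
    ∀ (s : List Char), ¬ [u, '#'] <:+: s → scanOne u l s = s := by
  intro s
  induction s using scanOne.induct u with
  | case1 => intro _; rfl
  | case2 c => intro _; rfl
  | case3 c d t hm ih =>
    intro hinf
    exact absurd ⟨[], t, by simp [hm.1, hm.2]⟩ hinf
  | case4 c d t hm ih =>
    intro hinf
    rw [scanOne, if_neg hm, ih]
    intro h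
    exact hinf (h.trans (List.infix_cons List.infix_rfl))

-- head of scanOne output is either l or the original head
theorem scanOne_head (u l : Char) (d : Char) (t : List Char) :
    (scanOne u l (d :: t)).head? = some l ∨ (scanOne u l (d :: t)).head? = some d := by
  match t with
  | [] => right; rfl
  | e :: t' =>
    rw [scanOne]
    split
    · left; rfl
    · right; rfl

-- L3: the output of scanOne contains no occurrence of [u,'#']
theorem not_infix_scanOne (u l : Char) (_hu : u ≠ '#') (hlu : l ≠ u) (hl : l ≠ '#') :
    ∀ (s : List Char), ¬ [u, '#'] <:+: scanOne u l s := by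
  intro s
  induction s using scanOne.induct u with
  | case1 =>
    intro h
    have := h.length_le; simp [scanOne] at this
  | case2 c =>
    intro h
    have := h.length_le; simp [scanOne] at this
  | case3 c d t hm ih =>
    rw [scanOne, if_pos hm]
    intro h
    rcases List.infix_cons_iff.mp h with hpre | hinf
    · exact hlu (List.cons_prefix_cons.mp hpre).1.symm
    · exact ih hinf
  | case4 c d t hm ih =>
    rw [scanOne, if_neg hm]
    intro h
    rcases List.infix_cons_iff.mp h with hpre | hinf
    · obtain ⟨hcu, hrest⟩ := List.cons_prefix_cons.mp hpre
      have hhead : (scanOne u l (d :: t)).head? = some '#' := by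
        rcases hx : scanOne u l (d :: t) with _ | ⟨x, xs⟩
        · rw [hx] at hrest; simp at hrest
        · rw [hx] at hrest
          obtain ⟨h1, _⟩ := List.cons_prefix_cons.mp hrest
          simp [← h1]
      rcases scanOne_head u l d t with hh | hh
      · rw [hh] at hhead; exact hl (Option.some.inj hhead)
      · rw [hh] at hhead
        exact hm ⟨hcu.symm, Option.some.inj hhead⟩
    · exact ih hinf

-- stage lemma: one while-loop of A equals one scanOne pass
theorem loopA_eq_scanOne (u l : Char) (pat rep : String)
    (hp : pat.toList = [u, '#']) (hr : rep.toList = [l])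
    (hu : u ≠ '#') (hlu : l ≠ u) (hl : l ≠ '#') (n : Nat) (s : String) :
    loopA pat rep (n + 2) s = String.ofList (scanOne u l s.toList) := by
  rw [loopA]
  by_cases hfind : PySem.Str.find s pat = -1
  · rw [if_pos hfind]
    have hni : ¬ [u, '#'] <:+: s.toList := by
      have := (PySem.Chars.find_eq_neg_one_iff s.toList pat.toList).mp hfind
      rwa [hp] at this
    rw [scanOne_id_of_not_infix u l s.toList hni, String.ofList_toList]
  · rw [if_neg hfind, loopA]
    have hrepl : PySem.Str.replace s pat rep = String.ofList (scanOne u l s.toList) := by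
      rw [PySem.Str.replace, hp, hr, replace_eq_scanOne]
    rw [hrepl]
    have hdone : PySem.Str.find (String.ofList (scanOne u l s.toList)) pat = -1 := by
      rw [PySem.Str.find, hp, String.toList_ofList]
      exact (PySem.Chars.find_eq_neg_one_iff _ _).mpr (not_infix_scanOne u l hu hlu hl s.toList)
    rw [if_pos hdone]

-- L0: scanMulti with the empty table is the identity
theorem scanMulti_nil : ∀ (s : List Char), scanMulti [] s = s := by
  intro s
  induction s using scanMulti.induct [] with
  | case1 => rfl
  | case2 c => rfl
  | case3 c t v hv ih => simp [List.lookup] at hv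
  | case4 c t hv ih => rw [scanMulti, if_pos rfl, hv, ih]
  | case5 c d t hd ih => rw [scanMulti, if_neg hd, ih]

-- L5: scanMulti preserves whether the head is '#'
theorem scanMulti_head_hash (P : List (Char × Char))
    (hP : ∀ p ∈ P, p.1 ≠ '#' ∧ p.2 ≠ '#') (t : List Char) :
    ((scanMulti P t).head? = some '#' ↔ t.head? = some '#') := by
  match t with
  | [] => simp [scanMulti]
  | [c] => simp [scanMulti]
  | c :: d :: t' =>
    rw [scanMulti]
    by_cases hd : d = '#'
    · rw [if_pos hd]
      cases hv : P.lookup c with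
      | some v =>
        obtain ⟨hk, hv'⟩ := hP _ (lookup_mem hv)
        simp [hv', hk]
      | none => simp
    · rw [if_neg hd]; simp

-- small shape facts about scanOne
theorem scanOne_cons_ne (u l c : Char) (hc : c ≠ u) (X : List Char) :
    scanOne u l (c :: X) = c :: scanOne u l X := by
  match X with
  | [] => rfl
  | x :: xs => rw [scanOne, if_neg (fun h => hc h.1)]

theorem scanOne_cons_head (u l c : Char) (X : List Char) (hX : X.head? ≠ some '#') :
    scanOne u l (c :: X) = c :: scanOne u l X := by
  match X with
  | [] => rfl
  | x :: xs => rw [scanOne, if_neg (fun h => hX (by simp [h.2]))]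

theorem scanOne_cons_match (u l : Char) (X : List Char) :
    scanOne u l (u :: '#' :: X) = l :: scanOne u l X := by
  rw [scanOne, if_pos ⟨rfl, rfl⟩]

-- a leading '#' is always copied by scanMulti when '#' is no key
theorem scanMulti_hash_cons (P : List (Char × Char)) (hP : ∀ p ∈ P, p.1 ≠ '#')
    (t : List Char) : scanMulti P ('#' :: t) = '#' :: scanMulti P t := by
  match t with
  | [] => rfl
  | e :: t' =>
    rw [scanMulti]
    by_cases he : e = '#'
    · rw [if_pos he]
      cases hv : P.lookup '#' with
      | some w => exact absurd (hP _ (lookup_mem hv)) (by simp)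
      | none => rfl
    · rw [if_neg he]

-- L4: composing one more scanOne pass extends the table
theorem scanOne_scanMulti (u l : Char) (P : List (Char × Char))
    (hu : u ≠ '#')
    (hP : ∀ p ∈ P, p.1 ≠ '#' ∧ p.1 ≠ u ∧ p.2 ≠ u ∧ p.2 ≠ '#') :
    ∀ (s : List Char), scanOne u l (scanMulti P s) = scanMulti ((u, l) :: P) s := by
  have hkeys : ∀ p ∈ P, p.1 ≠ '#' := fun p hp => (hP p hp).1
  have key : ∀ (n : Nat) (s : List Char), s.length ≤ n →
      scanOne u l (scanMulti P s) = scanMulti ((u, l) :: P) s := by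
    intro n
    induction n with
    | zero =>
      intro s h
      have : s = [] := List.eq_nil_of_length_eq_zero (Nat.le_zero.mp h)
      subst this; rfl
    | succ n ih =>
      intro s h
      match s with
      | [] => rfl
      | [c] => rfl
      | c :: d :: t =>
        simp only [List.length_cons] at h
        by_cases hd : d = '#'
        · subst hd
          cases hv : P.lookup c with
          | some v =>
            obtain ⟨hk1, hk2, hv1, hv2⟩ := hP _ (lookup_mem hv)
            have hlk : ((u, l) :: P).lookup c = some v := by
              rw [List.lookup, show (c == u) = false from by simpa using hk2]
              exact hv
            rw [scanMulti, if_pos rfl, hv, scanOne_cons_ne u l v hv1,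
              ih t (by omega), scanMulti, if_pos rfl, hlk]
          | none =>
            by_cases hc : c = u
            · subst hc
              have hlk : ((c, l) :: P).lookup c = some l := by
                rw [List.lookup, beq_self_eq_true c]
              rw [scanMulti, if_pos rfl, hv, scanMulti_hash_cons P hkeys t,
                scanOne_cons_match, ih t (by omega), scanMulti, if_pos rfl, hlk]
            · have hlk : ((u, l) :: P).lookup c = none := by
                rw [List.lookup, show (c == u) = false from by simpa using hc]
                exact hv
              have hkeys' : ∀ p ∈ (u, l) :: P, p.1 ≠ '#' := by
                intro p hp
                rcases List.mem_cons.mp hp with h1 | h1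
                · rw [h1]; exact hu
                · exact hkeys p h1
              rw [scanMulti, if_pos rfl, hv, scanMulti_hash_cons P hkeys t,
                scanOne_cons_ne u l c hc, scanOne_cons_ne u l '#' (Ne.symm hu),
                ih t (by omega), scanMulti, if_pos rfl, hlk,
                scanMulti_hash_cons ((u, l) :: P) hkeys' t]
        · have hP' : ∀ p ∈ P, p.1 ≠ '#' ∧ p.2 ≠ '#' :=
            fun p hp => ⟨(hP p hp).1, (hP p hp).2.2.2⟩
          have hhead : (scanMulti P (d :: t)).head? ≠ some '#' := by
            intro hcontra
            have := (scanMulti_head_hash P hP' (d :: t)).mp hcontra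
            simp at this
            exact hd this
          rw [scanMulti, if_neg hd, scanOne_cons_head u l c _ hhead,
            ih (d :: t) (by simp; omega), scanMulti, if_neg hd]
  intro s
  exact key s.length s (le_refl _)

-- the six-letter table
def pvP6 : List (Char × Char) :=
  [('A', 'a'), ('G', 'g'), ('F', 'f'), ('E', 'e'), ('D', 'd'), ('C', 'c')]

theorem lookup_pvP6_some (c : Char) (hc : (['C', 'D', 'E', 'F', 'G', 'A'].contains c) = true) :
    pvP6.lookup c = some (PySem.Chars.lowerChar c) := by
  have h6 : c = 'C' ∨ c = 'D' ∨ c = 'E' ∨ c = 'F' ∨ c = 'G' ∨ c = 'A' := by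
    simpa using hc
  rcases h6 with h | h | h | h | h | h <;> subst h <;> decide

theorem lookup_pvP6_none (c : Char) (hc : (['C', 'D', 'E', 'F', 'G', 'A'].contains c) = false) :
    pvP6.lookup c = none := by
  have h6 : ¬(c = 'C' ∨ c = 'D' ∨ c = 'E' ∨ c = 'F' ∨ c = 'G' ∨ c = 'A') := by
    simpa using hc
  simp only [not_or] at h6
  obtain ⟨h1, h2, h3, h4, h5, h6'⟩ := h6
  simp only [pvP6]
  rw [List.lookup, show (c == 'A') = false from beq_eq_false_iff_ne.mpr h6']
  rw [List.lookup, show (c == 'G') = false from beq_eq_false_iff_ne.mpr h5]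
  rw [List.lookup, show (c == 'F') = false from beq_eq_false_iff_ne.mpr h4]
  rw [List.lookup, show (c == 'E') = false from beq_eq_false_iff_ne.mpr h3]
  rw [List.lookup, show (c == 'D') = false from beq_eq_false_iff_ne.mpr h2]
  rw [List.lookup, show (c == 'C') = false from beq_eq_false_iff_ne.mpr h1]
  rfl

-- B's scan computes exactly the six-letter simultaneous replacement
theorem goB_eq_scanMulti : ∀ (s : List Char), goB s = scanMulti pvP6 s := by
  intro s
  induction s using goB.induct with
  | case1 => rfl
  | case2 c => rfl
  | case3 c d t hcond ih =>
    obtain ⟨hc, hd⟩ := Bool.and_eq_true_iff.mp hcond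
    have hd' : d = '#' := by simpa using hd
    rw [goB, if_pos hcond, scanMulti, if_pos hd', lookup_pvP6_some c hc, ih]
  | case4 c d t hcond ih =>
    have hcond' : (['C', 'D', 'E', 'F', 'G', 'A'].contains c && (d == '#')) = false :=
      Bool.eq_false_iff.mpr hcond
    rw [goB, if_neg hcond, scanMulti]
    by_cases hd : d = '#'
    · rw [if_pos hd]
      have hc : (['C', 'D', 'E', 'F', 'G', 'A'].contains c) = false := by
        rcases Bool.and_eq_false_iff.mp hcond' with h | h
        · exact h
        · simp [hd] at h
      rw [lookup_pvP6_none c hc, ih]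
    · rw [if_neg hd, ih]

-- A's six while-loops compute the same simultaneous replacement
theorem convert_song_eq_scanMulti (songs : String) :
    convert_song songs = String.ofList (scanMulti pvP6 songs.toList) := by
  show (loopA "A#" "a" (songs.toList.length + 2)
    (loopA "G#" "g" (songs.toList.length + 2)
    (loopA "F#" "f" (songs.toList.length + 2)
    (loopA "E#" "e" (songs.toList.length + 2)
    (loopA "D#" "d" (songs.toList.length + 2)
    (loopA "C#" "c" (songs.toList.length + 2) songs)))))) = _
  rw [loopA_eq_scanOne 'C' 'c' "C#" "c" (by decide) (by decide) (by decide) (by decide) (by decide),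
      loopA_eq_scanOne 'D' 'd' "D#" "d" (by decide) (by decide) (by decide) (by decide) (by decide),
      loopA_eq_scanOne 'E' 'e' "E#" "e" (by decide) (by decide) (by decide) (by decide) (by decide),
      loopA_eq_scanOne 'F' 'f' "F#" "f" (by decide) (by decide) (by decide) (by decide) (by decide),
      loopA_eq_scanOne 'G' 'g' "G#" "g" (by decide) (by decide) (by decide) (by decide) (by decide),
      loopA_eq_scanOne 'A' 'a' "A#" "a" (by decide) (by decide) (by decide) (by decide) (by decide)]
  simp only [String.toList_ofList]
  rw [show scanOne 'C' 'c' songs.toList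
        = scanOne 'C' 'c' (scanMulti [] songs.toList) from by rw [scanMulti_nil],
      scanOne_scanMulti 'C' 'c' [] (by decide) (by decide),
      scanOne_scanMulti 'D' 'd' _ (by decide) (by decide),
      scanOne_scanMulti 'E' 'e' _ (by decide) (by decide),
      scanOne_scanMulti 'F' 'f' _ (by decide) (by decide),
      scanOne_scanMulti 'G' 'g' _ (by decide) (by decide),
      scanOne_scanMulti 'A' 'a' _ (by decide) (by decide)]
  rfl

-- ===== VERDICT (by name: the statement is the Claim_ definition above) =====
theorem convert_song_spec : Claim_equal_convert_song := by
  intro songs _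
  unfold Spec_convert_song convert_song_alt
  rw [convert_song_eq_scanMulti, goB_eq_scanMulti]
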